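-- pv_equiv track=rewrite | github.com/EunBinChoi/biomedical-syntactic-analysis-master | named-entity-recognition/count_vocab.py | count_bio_noun
-- ===== SOURCE A (Python) =====
-- def count_bio_noun(bio_noun_sp_i_li_by_gene):
--     bio_noun_count_by_gene = []
--
--     # 반복문을 돌면서
--     for i in range(len(bio_noun_sp_i_li_by_gene)):
--         bio_noun_count_by_gene_tmp = []
--         bio_noun_count = 0
--         for j in range(len(bio_noun_sp_i_li_by_gene[i])):
--             bio_noun_count = 0
--
--             for k in range(len(bio_noun_sp_i_li_by_gene[i])):
--                 # 비교할 때 분류 타입은 보지 않기 위해서 :을 기준으로 split()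
--                 # 분류 타입 제외하고 만약에 앞의 유전자 이름이 같거나 서로 포함관계면 제외
--                 bio_split_for_compare_j = bio_noun_sp_i_li_by_gene[i][j].split(':')[0].upper()
--                 bio_split_for_compare_k = bio_noun_sp_i_li_by_gene[i][k].split(':')[0].upper()
--
--                 if ((bio_noun_sp_i_li_by_gene[i][j].upper() == bio_noun_sp_i_li_by_gene[i][k].upper()) \
--                     or (bio_split_for_compare_j == bio_split_for_compare_k)) \
--                     or ((bio_split_for_compare_j in bio_split_for_compare_k or \
--                     (bio_split_for_compare_k in bio_split_for_compare_j))):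
--                         bio_noun_count += 1
--
--             if(bio_noun_count != 0): bio_noun_count_by_gene_tmp.append(bio_noun_count)
--         bio_noun_count_by_gene.append(bio_noun_count_by_gene_tmp)
--
--     return bio_noun_count_by_gene
-- ===== SOURCE B (Python) =====
-- def count_bio_noun(bio_noun_sp_i_li_by_gene):
--     # Per gene: build a frequency table of the uppercased before-colon prefixes once,
--     # then each element's count is the total frequency of the prefixes that contain
--     # (or are contained in) its own prefix.
--     result = []
--     for gene in bio_noun_sp_i_li_by_gene:
--         freq = {}
--         for s in gene:
--             p = s.split(':')[0].upper()
--             freq[p] = freq.get(p, 0) + 1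
--         counts = []
--         for s in gene:
--             pj = s.split(':')[0].upper()
--             total = 0
--             for p, c in freq.items():
--                 if p in pj or pj in p:
--                     total += c
--             counts.append(total)
--         result.append(counts)
--     return result
-- ===== Notes on version B (the rewrite author's own statement) =====
-- stated objective: faster
-- what changed: Replaces A's nested quadratic scan that re-splits and re-uppercases both strings inside the innermost loop by a per-gene frequency table of the uppercased before-colon prefixes built once, each element's count then being the frequency-weighted sum over the distinct prefixes that contain or are contained in its own prefix (the full-string and prefix-equality branches are subsumed by containment).
import Mathlib
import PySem

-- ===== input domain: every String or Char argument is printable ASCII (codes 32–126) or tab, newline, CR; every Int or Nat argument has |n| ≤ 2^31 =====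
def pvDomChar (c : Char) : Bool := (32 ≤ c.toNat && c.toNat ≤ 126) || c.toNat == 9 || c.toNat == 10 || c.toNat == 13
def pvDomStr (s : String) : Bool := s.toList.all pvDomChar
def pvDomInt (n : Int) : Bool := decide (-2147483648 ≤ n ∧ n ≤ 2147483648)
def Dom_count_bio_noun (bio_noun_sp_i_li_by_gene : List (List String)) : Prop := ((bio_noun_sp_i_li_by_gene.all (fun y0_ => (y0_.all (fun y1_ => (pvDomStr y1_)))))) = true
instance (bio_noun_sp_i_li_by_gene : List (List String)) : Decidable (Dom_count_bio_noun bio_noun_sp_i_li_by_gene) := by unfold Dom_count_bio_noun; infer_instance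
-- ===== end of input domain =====

-- B replaces A's cubic re-splitting scan by a per-gene prefix frequency table summed over its
-- distinct keys (objective: faster by a constant-factor mechanism — prefixes computed once).

-- s.split(':')[0].upper() — the before-colon prefix, uppercased (shared subexpression of both Pythons)
def pvPrefix (s : String) : String :=
  PySem.Str.upper (((PySem.Str.split? s ":").getD []).headD "")

-- ===== PORT A =====
def count_bio_noun (bio_noun_sp_i_li_by_gene : List (List String)) : List (List Int) :=
  (PySem.List.pyRange 0 (PySem.List.len bio_noun_sp_i_li_by_gene)).foldl (fun acc i =>
    let li := PySem.List.pyGetD bio_noun_sp_i_li_by_gene i []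
    let tmp := (PySem.List.pyRange 0 (PySem.List.len li)).foldl (fun tmp j =>
        let c := (PySem.List.pyRange 0 (PySem.List.len li)).foldl (fun c k =>
            let sj := PySem.List.pyGetD li j ""
            let sk := PySem.List.pyGetD li k ""
            let pj := pvPrefix sj
            let pk := pvPrefix sk
            if (PySem.Str.upper sj == PySem.Str.upper sk || pj == pk)
               || (PySem.Str.isIn pj pk || PySem.Str.isIn pk pj)
            then c + 1 else c) (0 : Int)
        if c ≠ 0 then tmp ++ [c] else tmp) ([] : List Int)
    acc ++ [tmp]) []

-- ===== PORT B =====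
def count_bio_noun_alt (bio_noun_sp_i_li_by_gene : List (List String)) : List (List Int) :=
  bio_noun_sp_i_li_by_gene.foldl (fun res gene =>
    let freq := gene.foldl (fun d s =>
        d.insert (pvPrefix s) (d.getD (pvPrefix s) 0 + 1)) (PySem.Dict.empty : PySem.Dict String Int)
    let counts := gene.foldl (fun cs s =>
        let pj := pvPrefix s
        let total := freq.items.foldl (fun t pc =>
            if PySem.Str.isIn pc.1 pj || PySem.Str.isIn pj pc.1 then t + pc.2 else t) (0 : Int)
        cs ++ [total]) ([] : List Int)
    res ++ [counts]) []

-- ===== PRECONDITION & SPEC =====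
def Spec_count_bio_noun (bio_noun_sp_i_li_by_gene : List (List String)) (out : List (List Int)) : Prop := out = count_bio_noun_alt bio_noun_sp_i_li_by_gene
instance (bio_noun_sp_i_li_by_gene : List (List String)) (out : List (List Int)) : Decidable (Spec_count_bio_noun bio_noun_sp_i_li_by_gene out) := by unfold Spec_count_bio_noun; infer_instance

-- ===== CLAIM (what is proved, stated in full; the proofs are below) =====
def Claim_equal_count_bio_noun : Prop := ∀ (bio_noun_sp_i_li_by_gene : List (List String)), Dom_count_bio_noun bio_noun_sp_i_li_by_gene → Spec_count_bio_noun bio_noun_sp_i_li_by_gene (count_bio_noun bio_noun_sp_i_li_by_gene)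

-- ===== LEMMAS AND PROOFS =====

-- the symmetric containment relation both programs test on prefixes
def pvRel (a b : String) : Bool := PySem.Str.isIn a b || PySem.Str.isIn b a

lemma pvUpperChar_eq_colon (c : Char) : (PySem.Chars.upperChar c = ':') ↔ (c = ':') := by
  unfold PySem.Chars.upperChar PySem.Chars.islower
  split_ifs with h
  · simp only [Bool.and_eq_true, decide_eq_true_eq, Char.le_def] at h
    obtain ⟨h1, h2⟩ := h
    have h1' : 97 ≤ c.toNat := h1
    have h2' : c.toNat ≤ 122 := h2
    constructor
    · intro he
      exfalso
      have hv : Nat.isValidChar (c.toNat - 32) := by left; omega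
      have := congrArg Char.toNat he
      rw [Char.toNat_ofNat, if_pos hv] at this
      have h58 : (':' : Char).toNat = 58 := by decide
      omega
    · intro he; subst he
      have h58 : (':' : Char).toNat = 58 := by decide
      omega
  · constructor <;> intro he <;> exact he

lemma pvUpperColonPrefix (l : List Char) :
    List.isPrefixOf [':'] (PySem.Chars.upper l) = List.isPrefixOf [':'] l := by
  cases l with
  | nil => rfl
  | cons c rest =>
    simp only [PySem.Chars.upper, List.map_cons, List.isPrefixOf, Bool.and_true]
    by_cases hc : c = ':'
    · subst hc; rfl
    · have h2 : PySem.Chars.upperChar c ≠ ':' := fun h => hc ((pvUpperChar_eq_colon c).mp h)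
      simp [Ne.symm hc, Ne.symm h2]

lemma pvGo_upper (fuel : Nat) : ∀ (l cur : List Char) (acc : List (List Char)),
    PySem.Chars.splitOn.go [':'] fuel (PySem.Chars.upper l) (PySem.Chars.upper cur)
      (acc.map PySem.Chars.upper)
    = (PySem.Chars.splitOn.go [':'] fuel l cur acc).map PySem.Chars.upper := by
  induction fuel with
  | zero =>
    intro l cur acc
    simp [PySem.Chars.splitOn.go, PySem.Chars.upper]
  | succ n ih =>
    intro l cur acc
    cases l with
    | nil => simp [PySem.Chars.splitOn.go, PySem.Chars.upper]
    | cons c rest =>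
      rw [show PySem.Chars.upper (c :: rest) = PySem.Chars.upperChar c :: PySem.Chars.upper rest from rfl]
      rw [PySem.Chars.splitOn.go, PySem.Chars.splitOn.go]
      rw [show List.isPrefixOf [':'] (PySem.Chars.upperChar c :: PySem.Chars.upper rest)
            = List.isPrefixOf [':'] (c :: rest) from pvUpperColonPrefix (c :: rest)]
      by_cases hp : List.isPrefixOf [':'] (c :: rest) = true
      · rw [if_pos hp, if_pos hp]
        simpa [PySem.Chars.upper] using ih rest [] (cur.reverse :: acc)
      · rw [if_neg hp, if_neg hp]
        simpa [PySem.Chars.upper] using ih rest (c :: cur) acc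

lemma pvSplitOn_upper (l : List Char) :
    PySem.Chars.splitOn (PySem.Chars.upper l) [':']
    = (PySem.Chars.splitOn l [':']).map PySem.Chars.upper := by
  unfold PySem.Chars.splitOn
  rw [show (PySem.Chars.upper l).length = l.length from List.length_map ..]
  simpa [PySem.Chars.upper] using pvGo_upper (l.length + 1) l [] []

-- pvPrefix is a function of the uppercased string
lemma pvPrefix_eq (s : String) :
    pvPrefix s = String.ofList ((PySem.Chars.splitOn (PySem.Chars.upper s.toList) [':']).headD []) := by
  unfold pvPrefix
  rw [pvSplitOn_upper]
  simp [PySem.Str.split?, PySem.Chars.split?, PySem.Str.upper]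
  cases hh : (PySem.Chars.splitOn s.toList [':']).head? <;> simp [PySem.Chars.upper]

lemma pvPrefix_of_upper_eq {s t : String} (h : PySem.Str.upper s = PySem.Str.upper t) :
    pvPrefix s = pvPrefix t := by
  rw [pvPrefix_eq, pvPrefix_eq]
  have hu : PySem.Chars.upper s.toList = PySem.Chars.upper t.toList := by
    have := congrArg String.toList h
    simpa [PySem.Str.toList_upper] using this
  rw [hu]

lemma pvIsIn_self (p : String) : PySem.Str.isIn p p = true :=
  (PySem.Str.isIn_iff_infix p p).mpr (List.infix_refl _)

lemma pvRel_self (p : String) : pvRel p p = true := by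
  unfold pvRel; rw [pvIsIn_self]; rfl

-- A's four-way test collapses to the symmetric prefix containment
lemma pvCond_eq (sj sk : String) :
    ((PySem.Str.upper sj == PySem.Str.upper sk || pvPrefix sj == pvPrefix sk)
      || (PySem.Str.isIn (pvPrefix sj) (pvPrefix sk) || PySem.Str.isIn (pvPrefix sk) (pvPrefix sj)))
    = pvRel (pvPrefix sj) (pvPrefix sk) := by
  by_cases h1 : PySem.Str.upper sj = PySem.Str.upper sk
  · have hp : pvPrefix sj = pvPrefix sk := pvPrefix_of_upper_eq h1
    rw [hp]
    simp [pvRel_self]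
  · by_cases h2 : pvPrefix sj = pvPrefix sk
    · rw [h2]
      simp [pvRel_self]
    · simp [h1, h2, pvRel]

-- sum over a Nodup index list of a single-spike function
lemma pvSum_spike {d : List String} (hnd : d.Nodup) {x : String} (hx : x ∈ d) (v : Int) :
    (d.map (fun k => if k = x then v else 0)).sum = v := by
  induction d with
  | nil => cases hx
  | cons a d ih =>
    rcases List.mem_cons.mp hx with h | h
    · subst h
      have hnx : x ∉ d := (List.nodup_cons.mp hnd).1
      have hz : (d.map (fun k => if k = x then v else 0)) = d.map (fun _ => (0 : Int)) := by
        apply List.map_congr_left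
        intro k hk
        have : k ≠ x := fun he => hnx (he ▸ hk)
        simp [this]
      simp [hz]
    · have hax : a ≠ x := fun he => (List.nodup_cons.mp hnd).1 (he ▸ h)
      simp [hax, ih (List.nodup_cons.mp hnd).2 h]

-- counting with multiplicities over any Nodup superset of the values = countP
lemma pvSum_count (q : String → Bool) (ps : List String) :
    ∀ (d : List String), d.Nodup → (∀ x ∈ ps, x ∈ d) →
    (d.map (fun k => if q k then (ps.count k : Int) else 0)).sum = (ps.countP q : Int) := by
  induction ps with
  | nil => intro d _ _; simp
  | cons x ps ih =>
    intro d hnd hmem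
    have hx : x ∈ d := hmem x List.mem_cons_self
    have hsub : ∀ y ∈ ps, y ∈ d := fun y hy => hmem y (List.mem_cons_of_mem _ hy)
    have hstep : (d.map (fun k => if q k then ((x :: ps).count k : Int) else 0)).sum
        = (d.map (fun k => (if q k then (ps.count k : Int) else 0)
            + (if k = x then (if q x then (1 : Int) else 0) else 0))).sum := by
      apply congrArg
      apply List.map_congr_left
      intro k _
      by_cases hkx : k = x
      · subst hkx
        by_cases hq : q k <;> simp [hq]
      · have : ¬ (x == k) = true := by simp [Ne.symm hkx]
        by_cases hq : q k <;> simp [hq, List.count_cons, this, hkx]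
    rw [hstep, PySem.List.sum_map_add_int, ih d hnd hsub, pvSum_spike hnd hx]
    by_cases hq : q x <;> simp [hq]

-- proof-side views of the two per-gene computations (definitionally equal to the ports' bodies)
def pvCondA (sj sk : String) : Bool :=
  (PySem.Str.upper sj == PySem.Str.upper sk || pvPrefix sj == pvPrefix sk)
    || (PySem.Str.isIn (pvPrefix sj) (pvPrefix sk) || PySem.Str.isIn (pvPrefix sk) (pvPrefix sj))

def pvGeneA (li : List String) : List Int :=
  (PySem.List.pyRange 0 (PySem.List.len li)).foldl (fun tmp j =>
      if ((PySem.List.pyRange 0 (PySem.List.len li)).foldl (fun c k =>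
            if pvCondA (PySem.List.pyGetD li j "") (PySem.List.pyGetD li k "") then c + 1 else c) (0 : Int)) ≠ 0
      then tmp ++ [(PySem.List.pyRange 0 (PySem.List.len li)).foldl (fun c k =>
            if pvCondA (PySem.List.pyGetD li j "") (PySem.List.pyGetD li k "") then c + 1 else c) (0 : Int)]
      else tmp) []

def pvGeneB (li : List String) : List Int :=
  li.foldl (fun cs s =>
    cs ++ [(li.foldl (fun d s' => d.insert (pvPrefix s') (d.getD (pvPrefix s') 0 + 1))
              (PySem.Dict.empty : PySem.Dict String Int)).items.foldl
        (fun t pc => if PySem.Str.isIn pc.1 (pvPrefix s) || PySem.Str.isIn (pvPrefix s) pc.1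
                     then t + pc.2 else t) (0 : Int)]) []

-- B's per-element total over the counter = the count of related elements
lemma pvTotal_eq (li : List String) (pj : String) :
    ((PySem.Dict.counter (li.map pvPrefix)).items.foldl (fun t pc =>
        if PySem.Str.isIn pc.1 pj || PySem.Str.isIn pj pc.1 then t + pc.2 else t) (0 : Int))
    = (li.countP (fun sk => pvRel pj (pvPrefix sk)) : Int) := by
  have h1 : ((PySem.Dict.counter (li.map pvPrefix)).items.foldl (fun t pc =>
        if PySem.Str.isIn pc.1 pj || PySem.Str.isIn pj pc.1 then t + pc.2 else t) (0 : Int))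
      = ((PySem.Dict.counter (li.map pvPrefix)).items.foldl (fun t pc =>
        t + (if pvRel pc.1 pj then pc.2 else 0)) (0 : Int)) := by
    apply PySem.List.foldl_congr_mem
    intro acc pc _
    unfold pvRel
    split_ifs <;> simp
  rw [h1, PySem.List.foldl_add, PySem.Dict.items_counter, List.map_map]
  rw [show ((fun pc : String × Int => if pvRel pc.1 pj then pc.2 else 0) ∘
        (fun k : String => (k, ((li.map pvPrefix).count k : Int))))
      = (fun k : String => if pvRel k pj then ((li.map pvPrefix).count k : Int) else 0) from rfl]
  rw [pvSum_count (fun k => pvRel k pj) (li.map pvPrefix) _ (PySem.Set.nodup_ofList _)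
      (fun x hx => (PySem.Set.mem_ofList _ _).mpr hx)]
  rw [List.countP_map]
  have h3 : ((fun k => pvRel k pj) ∘ pvPrefix) = fun sk => pvRel pj (pvPrefix sk) := by
    funext sk
    unfold pvRel
    exact Bool.or_comm _ _
  rw [h3]
  simp

-- A's per-element inner loop counts exactly the related elements
lemma pvCnt_eq (li : List String) (sj : String) :
    li.foldl (fun c sk => if pvCondA sj sk then c + 1 else c) (0 : Int)
    = (li.countP (fun sk => pvRel (pvPrefix sj) (pvPrefix sk)) : Int) := by
  have h1 : li.foldl (fun c sk => if pvCondA sj sk then c + 1 else c) (0 : Int)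
      = li.foldl (fun c sk => if pvRel (pvPrefix sj) (pvPrefix sk) then c + 1 else c) (0 : Int) := by
    apply PySem.List.foldl_congr_mem
    intro acc sk _
    rw [show pvCondA sj sk = pvRel (pvPrefix sj) (pvPrefix sk) from pvCond_eq sj sk]
  rw [h1, PySem.List.foldl_count_if]
  simp

lemma pvGene_eq (li : List String) : pvGeneA li = pvGeneB li := by
  have hA : pvGeneA li = li.foldl (fun tmp sj =>
      tmp ++ [(li.countP (fun sk => pvRel (pvPrefix sj) (pvPrefix sk)) : Int)]) [] := by
    have h1 : pvGeneA li = li.foldl (fun tmp sj =>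
        if (li.foldl (fun c sk => if pvCondA sj sk then c + 1 else c) (0 : Int)) ≠ 0
        then tmp ++ [li.foldl (fun c sk => if pvCondA sj sk then c + 1 else c) (0 : Int)]
        else tmp) [] := by
      unfold pvGeneA
      have houter := PySem.List.foldl_pyRange_pyGetD li "" (fun tmp sj =>
          if (li.foldl (fun c sk => if pvCondA sj sk then c + 1 else c) (0 : Int)) ≠ 0
          then tmp ++ [li.foldl (fun c sk => if pvCondA sj sk then c + 1 else c) (0 : Int)]
          else tmp) ([] : List Int) (le_refl 0)
      simp only [Int.toNat_zero, List.drop_zero] at houter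
      have hinner : ∀ sj : String,
          (PySem.List.pyRange 0 (PySem.List.len li)).foldl (fun c k =>
              if pvCondA sj (PySem.List.pyGetD li k "") then c + 1 else c) (0 : Int)
          = li.foldl (fun c sk => if pvCondA sj sk then c + 1 else c) (0 : Int) := fun sj =>
        PySem.List.foldl_pyRange_pyGetD li "" (fun c sk => if pvCondA sj sk then c + 1 else c)
          (0 : Int) (le_refl 0)
      rw [← houter]
      apply PySem.List.foldl_congr_mem
      intro acc j _
      rw [hinner]
    rw [h1]
    apply PySem.List.foldl_congr_mem
    intro acc sj hsj
    rw [pvCnt_eq]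
    have hpos : 0 < li.countP (fun sk => pvRel (pvPrefix sj) (pvPrefix sk)) := by
      rw [List.countP_pos_iff]
      exact ⟨sj, hsj, pvRel_self _⟩
    have hne : ((li.countP (fun sk => pvRel (pvPrefix sj) (pvPrefix sk)) : Int)) ≠ 0 := by
      omega
    rw [if_pos hne]
  have hB : pvGeneB li = li.foldl (fun tmp sj =>
      tmp ++ [(li.countP (fun sk => pvRel (pvPrefix sj) (pvPrefix sk)) : Int)]) [] := by
    unfold pvGeneB
    apply PySem.List.foldl_congr_mem
    intro acc s _
    have hf : li.foldl (fun d s' => d.insert (pvPrefix s') (d.getD (pvPrefix s') 0 + 1))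
          (PySem.Dict.empty : PySem.Dict String Int)
        = PySem.Dict.counter (li.map pvPrefix) := by
      rw [← PySem.Dict.foldl_insert_getD_add_one_eq_counter, List.foldl_map]
    rw [hf, pvTotal_eq li (pvPrefix s)]
  rw [hA, hB]

lemma pvMain (g : List (List String)) : count_bio_noun g = count_bio_noun_alt g := by
  have hA : count_bio_noun g = g.foldl (fun acc li => acc ++ [pvGeneA li]) [] := by
    unfold count_bio_noun
    exact PySem.List.foldl_pyRange_pyGetD g ([] : List String)
      (fun acc li => acc ++ [pvGeneA li]) ([] : List (List Int)) (le_refl 0)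
  have hB : count_bio_noun_alt g = g.foldl (fun res gene => res ++ [pvGeneB gene]) [] := by
    unfold count_bio_noun_alt pvGeneB
    rfl
  rw [hA, hB]
  apply PySem.List.foldl_congr_mem
  intro acc li _
  rw [pvGene_eq]

-- ===== VERDICT (by name: the statement is the Claim_ definition above) =====
theorem count_bio_noun_spec : Claim_equal_count_bio_noun := by
  intro g _
  unfold Spec_count_bio_noun
  exact pvMain g
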